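-- pv_equiv track=rewrite | github.com/azmisaud/MCALab3 | PracticeQuestions/Practice34.py | count_and_max
-- ===== SOURCE A (Python) =====
-- def count_and_max(text):
--     count_sentences=len(text.split('.'))
--     count_words=len(text.replace('.',' ').split())
--
--     words=text.replace('.',' ').split()
--
--     map={}
--
--     for word in words:
--         if word not in map:
--             map[word]=1
--         else:
--             map[word]+=1
--
--     max_word=""
--     max_count=0
--
--     for key,value in map.items():
--         if value>max_count:
--             max_word=key
--             max_count=value
--
--     return count_sentences,count_words,max_word
--
-- text="Saud Saud Saud.Zindagi na milegi dubara"
-- ===== SOURCE B (Python) =====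
-- def count_and_max(text):
--     words = text.replace('.', ' ').split()
--     max_word = ""
--     max_count = 0
--     for i, w in enumerate(words):
--         if w not in words[:i]:          # first occurrence of w
--             c = words.count(w)
--             if c > max_count:
--                 max_word, max_count = w, c
--     return len(text.split('.')), len(words), max_word
-- ===== Notes on version B (the rewrite author's own statement) =====
-- stated objective: alternative
-- what changed: B removes A's frequency dict entirely: it scans the word list once, and at each first occurrence (detected by membership in the preceding prefix) recomputes that word's frequency with list.count, keeping a running strict maximum; first-occurrence order reproduces A's dict-insertion-order tie-breaking.
import Mathlib
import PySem

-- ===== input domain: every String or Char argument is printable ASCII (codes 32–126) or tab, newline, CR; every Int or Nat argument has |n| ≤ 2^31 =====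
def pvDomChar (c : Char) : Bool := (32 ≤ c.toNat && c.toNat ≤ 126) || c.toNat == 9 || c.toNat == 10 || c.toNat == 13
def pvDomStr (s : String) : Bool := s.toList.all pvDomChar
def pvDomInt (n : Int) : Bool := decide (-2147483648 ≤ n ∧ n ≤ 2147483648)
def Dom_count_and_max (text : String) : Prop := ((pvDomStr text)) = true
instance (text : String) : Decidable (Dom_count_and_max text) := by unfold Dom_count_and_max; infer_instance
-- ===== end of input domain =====

-- B drops A's frequency dict: it scans first occurrences (prefix membership) and recomputes each count with list.count (alternative; quadratic, not faster).

-- ===== PORT A =====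
def count_and_max (text : String) : Int × Int × String :=
  let count_sentences : Int := ((PySem.Str.split? text ".").getD []).length
  let count_words : Int := (PySem.Str.split₀ (PySem.Str.replace text "." " ")).length
  let words := PySem.Str.split₀ (PySem.Str.replace text "." " ")
  let m : PySem.Dict String Int :=
    words.foldl (fun d word => if d.contains word = false then d.insert word 1 else d.modify word 0 (· + 1)) PySem.Dict.empty
  let r := m.items.foldl (fun (acc : String × Int) kv => if kv.2 > acc.2 then kv else acc) ("", 0)
  (count_sentences, count_words, r.1)

-- ===== PORT B =====
def count_and_max_alt (text : String) : Int × Int × String :=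
  let words := PySem.Str.split₀ (PySem.Str.replace text "." " ")
  let r := (PySem.List.enumerate words 0).foldl
    (fun (acc : String × Int) p =>
      if (PySem.List.slice words none (some p.1)).contains p.2 = false then
        let c : Int := words.count p.2
        if c > acc.2 then (p.2, c) else acc
      else acc) ("", 0)
  (((PySem.Str.split? text ".").getD []).length, (words.length : Int), r.1)

-- ===== PRECONDITION & SPEC =====
def Spec_count_and_max (text : String) (out : Int × Int × String) : Prop := out = count_and_max_alt text
instance (text : String) (out : Int × Int × String) : Decidable (Spec_count_and_max text out) := by unfold Spec_count_and_max; infer_instance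

-- ===== CLAIM =====
def Claim_equal_count_and_max : Prop := ∀ (text : String), Dom_count_and_max text → Spec_count_and_max text (count_and_max text)

-- ===== LEMMAS AND PROOFS =====

-- A's counting step (membership branch) is the counter step written with getD.
lemma dict_step_eq (d : PySem.Dict String Int) (w : String) :
    (if d.contains w = false then d.insert w 1 else d.modify w 0 (· + 1)) = d.insert w (d.getD w 0 + 1) := by
  by_cases h : d.contains w = true
  · simp [h, PySem.Dict.modify]
  · have h0 : d.getD w 0 = 0 := PySem.Dict.getD_of_not_contains d 0 (by simpa using h)
    simp [h, h0]

-- B's guarded scan over enumerate(words) visits exactly the first occurrences, in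
-- order: it is the plain fold of its body over set(words) (first occurrences in order).
lemma enum_guard_foldl {α β : Type} [DecidableEq α] (g : β → α → β) (xs : List α) (a : β) :
    (PySem.List.enumerate xs 0).foldl
      (fun acc p => if (PySem.List.slice xs none (some p.1)).contains p.2 = false then g acc p.2 else acc) a
      = (PySem.Set.ofList xs).foldl g a := by
  induction xs using List.reverseRecOn generalizing a with
  | nil => rfl
  | append_singleton xs x ih =>
    rw [PySem.List.enumerate_append, List.foldl_append]
    have hcongr : (PySem.List.enumerate xs 0).foldl
        (fun acc p => if (PySem.List.slice (xs ++ [x]) none (some p.1)).contains p.2 = false then g acc p.2 else acc) a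
        = (PySem.List.enumerate xs 0).foldl
        (fun acc p => if (PySem.List.slice xs none (some p.1)).contains p.2 = false then g acc p.2 else acc) a := by
      apply PySem.List.foldl_congr_mem
      intro acc p hp
      obtain ⟨k, hk, rfl⟩ := (PySem.List.mem_enumerate_iff _ _ _).mp hp
      have h1 : PySem.List.slice (xs ++ [x]) none (some ((0 : Int) + (k : Nat))) = PySem.List.slice xs none (some ((0 : Int) + (k : Nat))) := by
        rw [show ((0 : Int) + (k : Nat)) = ((k : Nat) : Int) by ring]
        rw [PySem.List.slice_to_natCast, PySem.List.slice_to_natCast,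
            List.take_append_of_le_length (Nat.le_of_lt hk)]
      rw [h1]
    rw [hcongr, ih]
    have hofl : PySem.Set.ofList (xs ++ [x]) = PySem.Set.add (PySem.Set.ofList xs) x := by
      rw [PySem.Set.ofList_eq_foldl, PySem.Set.ofList_eq_foldl, List.foldl_append]
      rfl
    have hsl : PySem.List.slice (xs ++ [x]) none (some ((0 : Int) + (xs.length : Nat))) = xs := by
      rw [show ((0 : Int) + (xs.length : Nat)) = ((xs.length : Nat) : Int) by ring]
      rw [PySem.List.slice_to_natCast, List.take_append_of_le_length (le_refl _), List.take_length]
    simp only [hofl, PySem.Set.add]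
    by_cases hmem : x ∈ xs
    · simp [hmem]
    · simp [hmem, List.foldl_append]
-- ===== VERDICT =====
theorem count_and_max_spec : Claim_equal_count_and_max := by
  intro text _
  unfold Spec_count_and_max count_and_max count_and_max_alt
  simp only []
  set words := PySem.Str.split₀ (PySem.Str.replace text "." " ") with hw
  have hstep : (fun (d : PySem.Dict String Int) word =>
      if d.contains word = false then d.insert word 1 else d.modify word 0 (· + 1))
      = fun d w => d.insert w (d.getD w 0 + 1) := by
    funext d w; exact dict_step_eq d w
  rw [hstep, PySem.Dict.foldl_insert_getD_add_one_eq_counter, PySem.Dict.items_counter,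
      List.foldl_map,
      enum_guard_foldl (fun (acc : String × Int) w =>
        if (words.count w : Int) > acc.2 then (w, (words.count w : Int)) else acc) words ("", 0)]
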